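-- pv_equiv track=rewrite | github.com/complynx/pilot | job_description_fixer.py | join_input_files
-- ===== SOURCE A (Python) =====
-- import numbers
--
-- def stringify_weird(arg):
--     if arg is None:
--         return "NULL"
--     if isinstance(arg, numbers.Number):
--         return arg
--     return str(arg)
--
-- def join(arr):
--     return ",".join(str(stringify_weird(x)) for x in arr)
--
-- def join_input_files(unfixed, input_files):
--     in_files = []
--     ddm_endpoint = []
--     destination_se = []
--     dblock_token = []
--     datasets = []
--     dblocks = []
--     size = []
--     c_sum = []
--     scope = None
--
--     for i in input_files:
--         in_files.append(i)
--         ddm_endpoint.append(input_files[i]['ddm_endpoint'])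
--         destination_se.append(input_files[i]['storage_element'])
--         dblock_token.append(input_files[i]['dispatch_dblock_token'])
--         datasets.append(input_files[i]['dataset'])
--         dblocks.append(input_files[i]['dblock'])
--         size.append(input_files[i]['size'])
--         c_sum.append(input_files[i]['checksum'])
--         scope = input_files[i]['scope']  # in old description all files are in one scope, so we assume this
--
--     unfixed['inFiles'] = join(in_files)
--     unfixed['ddmEndPointIn'] = join(ddm_endpoint)
--     unfixed['destinationSE'] = join(destination_se)
--     unfixed['dispatchDBlockToken'] = join(dblock_token)
--     unfixed['realDatasetsIn'] = join(datasets)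
--     unfixed['prodDBlocks'] = join(dblocks)
--     unfixed['fsize'] = join(size)
--     unfixed['checksum'] = join(c_sum)
--     unfixed['scopeIn'] = stringify_weird(scope)
--
--     return unfixed
-- ===== SOURCE B (Python) =====
-- import numbers
--
-- def stringify_weird(arg):
--     if arg is None:
--         return "NULL"
--     if isinstance(arg, numbers.Number):
--         return arg
--     return str(arg)
--
-- _COLUMNS = [
--     ('inFiles', None),                              # None = the file names themselves
--     ('ddmEndPointIn', 'ddm_endpoint'),
--     ('destinationSE', 'storage_element'),
--     ('dispatchDBlockToken', 'dispatch_dblock_token'),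
--     ('realDatasetsIn', 'dataset'),
--     ('prodDBlocks', 'dblock'),
--     ('fsize', 'size'),
--     ('checksum', 'checksum'),
-- ]
--
-- def join_input_files(unfixed, input_files):
--     files = list(input_files.values())
--     for out_key, field in _COLUMNS:
--         if field is None:
--             cells = list(input_files)
--         else:
--             cells = [f[field] for f in files]
--         unfixed[out_key] = ",".join(str(stringify_weird(c)) for c in cells)
--     scope = files[-1]['scope'] if files else None
--     unfixed['scopeIn'] = stringify_weird(scope)
--     return unfixed
-- ===== Notes on version B (the rewrite author's own statement) =====
-- stated objective: simpler
-- what changed: A fills eight parallel accumulator lists in one row-wise loop over the files and then joins each; B is table-driven: a metadata table maps each output key to its source field and one column-wise pass per table row collects and joins that single field, with scope taken directly from the last file.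
import Mathlib
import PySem

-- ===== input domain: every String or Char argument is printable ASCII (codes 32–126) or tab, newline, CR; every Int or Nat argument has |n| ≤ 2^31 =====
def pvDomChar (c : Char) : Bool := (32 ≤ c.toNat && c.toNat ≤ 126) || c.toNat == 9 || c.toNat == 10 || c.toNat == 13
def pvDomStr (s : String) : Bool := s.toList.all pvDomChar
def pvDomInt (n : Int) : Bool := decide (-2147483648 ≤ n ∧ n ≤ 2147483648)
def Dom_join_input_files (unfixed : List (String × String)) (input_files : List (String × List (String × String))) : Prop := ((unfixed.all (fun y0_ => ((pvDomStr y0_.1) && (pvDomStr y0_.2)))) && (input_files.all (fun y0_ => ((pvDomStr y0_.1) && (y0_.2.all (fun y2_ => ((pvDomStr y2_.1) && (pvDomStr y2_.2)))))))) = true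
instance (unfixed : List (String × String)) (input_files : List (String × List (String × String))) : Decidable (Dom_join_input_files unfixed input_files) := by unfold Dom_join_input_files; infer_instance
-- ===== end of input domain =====

-- B replaces A's single row-wise loop over eight parallel lists by a field-table with one
-- column-wise pass per output key (simpler decomposition, same cost). Both A and B mutate
-- `unfixed` in Python by inserting the same nine keys with the same values in the same order;
-- the theorems below are about the returned dict (= that mutated dict).

-- shared module-level helper of both Python files: stringify_weird on a string-or-None value
-- (None → "NULL", a string → itself; exact on the typed domain, where no numbers occur)
def stringify_weird (o : Option String) : String :=
  match o with
  | none => "NULL"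
  | some s => s

-- ===== PORT A =====
-- A's `join(arr)`: on the typed domain every element is a string, so str(stringify_weird(x)) = x
def pyjoin (arr : List String) : String := PySem.Str.join "," arr

-- the 8-lists + scope loop state of A, one field per Python accumulator variable
structure StA where
  in_files : List String
  ddm_endpoint : List String
  destination_se : List String
  dblock_token : List String
  datasets : List String
  dblocks : List String
  size : List String
  c_sum : List String
  scope : Option String
deriving Repr, DecidableEq

def join_input_files (unfixed : List (String × String)) (input_files : List (String × List (String × String))) : List (String × String) :=
  let d := PySem.Dict.mk input_files
  -- Python raises KeyError when an inner dict lacks one of the eight fields; Pre_ excludes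
  -- exactly those inputs, so the `getD _ ""` defaults below are never reached inside Pre_.
  let st := d.keys.foldl
    (fun (st : StA) i =>
      let f := PySem.Dict.mk (d.getD i [])
      { in_files := st.in_files ++ [i]
        ddm_endpoint := st.ddm_endpoint ++ [f.getD "ddm_endpoint" ""]
        destination_se := st.destination_se ++ [f.getD "storage_element" ""]
        dblock_token := st.dblock_token ++ [f.getD "dispatch_dblock_token" ""]
        datasets := st.datasets ++ [f.getD "dataset" ""]
        dblocks := st.dblocks ++ [f.getD "dblock" ""]
        size := st.size ++ [f.getD "size" ""]
        c_sum := st.c_sum ++ [f.getD "checksum" ""]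
        scope := some (f.getD "scope" "") })
    ⟨[], [], [], [], [], [], [], [], none⟩
  let u := PySem.Dict.mk unfixed
  (((((((((u.insert "inFiles" (pyjoin st.in_files)).insert
      "ddmEndPointIn" (pyjoin st.ddm_endpoint)).insert
      "destinationSE" (pyjoin st.destination_se)).insert
      "dispatchDBlockToken" (pyjoin st.dblock_token)).insert
      "realDatasetsIn" (pyjoin st.datasets)).insert
      "prodDBlocks" (pyjoin st.dblocks)).insert
      "fsize" (pyjoin st.size)).insert
      "checksum" (pyjoin st.c_sum)).insert
      "scopeIn" (stringify_weird st.scope)).items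

-- ===== PORT B =====
def bColumns : List (String × Option String) :=
  [("inFiles", none),
   ("ddmEndPointIn", some "ddm_endpoint"),
   ("destinationSE", some "storage_element"),
   ("dispatchDBlockToken", some "dispatch_dblock_token"),
   ("realDatasetsIn", some "dataset"),
   ("prodDBlocks", some "dblock"),
   ("fsize", some "size"),
   ("checksum", some "checksum")]

def join_input_files_alt (unfixed : List (String × String)) (input_files : List (String × List (String × String))) : List (String × String) :=
  let d := PySem.Dict.mk input_files
  let files := d.values
  let u := bColumns.foldl
    (fun (u : PySem.Dict String String) col =>
      let cells := match col.2 with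
        | none => d.keys
        | some fld => files.map (fun f => (PySem.Dict.mk f).getD fld "")
      u.insert col.1 (PySem.Str.join "," cells))
    (PySem.Dict.mk unfixed)
  let scope := files.getLast?.map (fun f => (PySem.Dict.mk f).getD "scope" "")
  (u.insert "scopeIn" (stringify_weird scope)).items

-- ===== PRECONDITION & SPEC =====
-- Pre_ excludes (a) inner dicts missing one of the eight accessed fields — there Python A
-- raises KeyError — and (b) association lists with duplicate keys, which cannot arise from a
-- real Python dict, so first-match-lookup order there is accidental.
def Pre_join_input_files (unfixed : List (String × String)) (input_files : List (String × List (String × String))) : Prop :=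
  (unfixed.map Prod.fst).Nodup ∧ (input_files.map Prod.fst).Nodup ∧
  ∀ p ∈ input_files, (p.2.map Prod.fst).Nodup ∧
    ∀ fld ∈ ["ddm_endpoint", "storage_element", "dispatch_dblock_token", "dataset",
             "dblock", "size", "checksum", "scope"], fld ∈ p.2.map Prod.fst
instance (unfixed : List (String × String)) (input_files : List (String × List (String × String))) : Decidable (Pre_join_input_files unfixed input_files) := by unfold Pre_join_input_files; infer_instance

def pvWitness_join_input_files : (List (String × String)) × (List (String × List (String × String))) :=
  ([("x", "y")],
   [("f1", [("ddm_endpoint", "e"), ("storage_element", "s"), ("dispatch_dblock_token", "t"),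
            ("dataset", "d"), ("dblock", "b"), ("size", "1"), ("checksum", "c"), ("scope", "sc")])])

def Spec_join_input_files (unfixed : List (String × String)) (input_files : List (String × List (String × String))) (out : List (String × String)) : Prop := out = join_input_files_alt unfixed input_files
instance (unfixed : List (String × String)) (input_files : List (String × List (String × String))) (out : List (String × String)) : Decidable (Spec_join_input_files unfixed input_files out) := by unfold Spec_join_input_files; infer_instance

-- ===== CLAIM (what is proved, stated in full; the proofs are below) =====
def Claim_equal_join_input_files : Prop := ∀ (unfixed : List (String × String)) (input_files : List (String × List (String × String))), Dom_join_input_files unfixed input_files → Pre_join_input_files unfixed input_files → Spec_join_input_files unfixed input_files (join_input_files unfixed input_files)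

-- ===== LEMMAS AND PROOFS =====

-- characterisation of A's single loop: each accumulator ends as its map over the keys,
-- and scope ends as the last key's scope (or the initial value for no keys)
theorem foldA_char (g2 g3 g4 g5 g6 g7 g8 g9 : String → String)
    (ks : List String) (st : StA) :
    ks.foldl
      (fun (st : StA) i =>
        { in_files := st.in_files ++ [i]
          ddm_endpoint := st.ddm_endpoint ++ [g2 i]
          destination_se := st.destination_se ++ [g3 i]
          dblock_token := st.dblock_token ++ [g4 i]
          datasets := st.datasets ++ [g5 i]
          dblocks := st.dblocks ++ [g6 i]
          size := st.size ++ [g7 i]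
          c_sum := st.c_sum ++ [g8 i]
          scope := some (g9 i) }) st
    = { in_files := st.in_files ++ ks
        ddm_endpoint := st.ddm_endpoint ++ ks.map g2
        destination_se := st.destination_se ++ ks.map g3
        dblock_token := st.dblock_token ++ ks.map g4
        datasets := st.datasets ++ ks.map g5
        dblocks := st.dblocks ++ ks.map g6
        size := st.size ++ ks.map g7
        c_sum := st.c_sum ++ ks.map g8
        scope := match ks.getLast? with
                 | none => st.scope
                 | some k => some (g9 k) } := by
  induction ks generalizing st with
  | nil => simp
  | cons k t ih =>
    simp only [List.foldl_cons, ih, List.map_cons]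
    cases t with
    | nil => simp
    | cons a b =>
      cases hlast : (a :: b).getLast? with
      | none => simp at hlast
      | some x => simp [hlast]

theorem join_input_files_spec : Claim_equal_join_input_files := by
  intro unfixed input_files _hDom hPre
  unfold Spec_join_input_files join_input_files join_input_files_alt
  have hnd : (PySem.Dict.mk input_files).keys.Nodup := by
    simpa [PySem.Dict.keys_mk] using hPre.2.1
  have hvals : (PySem.Dict.mk input_files).values
      = (PySem.Dict.mk input_files).keys.map
          (fun k => (PySem.Dict.mk input_files).getD k []) :=
    PySem.Dict.values_eq_map_keys _ hnd []
  simp only [bColumns, List.foldl_cons, List.foldl_nil, foldA_char, hvals,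
    List.map_map, List.getLast?_map, List.nil_append, pyjoin, Option.map_map]
  cases (PySem.Dict.mk input_files).keys.getLast? with
  | none => simp [Function.comp_def]
  | some k => simp [Function.comp_def]
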